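-- pv_equiv track=rewrite | github.com/KhanG8900/ALGORITHM | algorithms/arrays/top_1.py | top_1_v2
-- ===== SOURCE A (Python) =====
-- def top_1_v2(arr):
--     # Once Iteration
--     ans = []
--     mostcount = 0
--     count = {}
--     for x in arr:
--         count[x] = count.get(x, 0) + 1
--         if count[x] > mostcount:
--             ans = [x]
--             mostcount = count[x]
--         elif count[x] == mostcount:
--             ans.append(x)
--     return ans
-- ===== SOURCE B (Python) =====
-- def top_1_v2(arr):
--     # Two-pass: find the max frequency first, then emit each element at the
--     # moment its running count reaches that maximum (in input order).
--     counts = {}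
--     m = 0
--     for x in arr:
--         counts[x] = counts.get(x, 0) + 1
--         m = max(m, counts[x])
--     out = []
--     run = {}
--     for x in arr:
--         run[x] = run.get(x, 0) + 1
--         if run[x] == m:
--             out.append(x)
--     return out
-- ===== Notes on version B (the rewrite author's own statement) =====
-- stated objective: simpler
-- what changed: Replaces A's single pass that resets/extends the answer list as the running maximum evolves with two plain passes: one to find the maximum frequency m, one to append each element exactly when its running count reaches m.
import Mathlib
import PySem

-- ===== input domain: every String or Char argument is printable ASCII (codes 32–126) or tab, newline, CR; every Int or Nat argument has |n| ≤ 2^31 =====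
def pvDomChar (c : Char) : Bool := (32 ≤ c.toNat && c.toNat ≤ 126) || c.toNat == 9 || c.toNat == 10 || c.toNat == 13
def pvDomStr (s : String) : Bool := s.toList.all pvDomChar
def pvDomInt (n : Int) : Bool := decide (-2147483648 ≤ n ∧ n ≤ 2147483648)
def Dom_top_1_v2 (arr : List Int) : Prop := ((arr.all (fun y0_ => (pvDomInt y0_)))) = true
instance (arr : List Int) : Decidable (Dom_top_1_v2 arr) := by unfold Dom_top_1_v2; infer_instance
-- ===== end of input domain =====

-- B replaces A's single pass that resets/extends the answer as the running maximum
-- evolves with two plain passes (find the max frequency m, then emit each element when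
-- its running count reaches m); objective: simpler. Return-value equivalence only.

-- ===== PORT A =====
def top_1_v2 (arr : List Int) : List Int :=
  (arr.foldl
    (fun (s : List Int × Int × PySem.Dict Int Int) x =>
      let c := s.2.2.getD x 0 + 1          -- count[x] = count.get(x, 0) + 1
      let d := s.2.2.insert x c
      if c > s.2.1 then ([x], c, d)        -- ans = [x]; mostcount = count[x]
      else if c = s.2.1 then (s.1 ++ [x], s.2.1, d)   -- ans.append(x)
      else (s.1, s.2.1, d))
    (([] : List Int), (0 : Int), (PySem.Dict.empty : PySem.Dict Int Int))).1

-- ===== PORT B =====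
def top_1_v2_alt (arr : List Int) : List Int :=
  let m := (arr.foldl
    (fun (s : PySem.Dict Int Int × Int) x =>
      let c := s.1.getD x 0 + 1            -- counts[x] = counts.get(x, 0) + 1
      (s.1.insert x c, max s.2 c))         -- m = max(m, counts[x])
    ((PySem.Dict.empty : PySem.Dict Int Int), (0 : Int))).2
  (arr.foldl
    (fun (s : List Int × PySem.Dict Int Int) x =>
      let c := s.2.getD x 0 + 1            -- run[x] = run.get(x, 0) + 1
      (if c = m then s.1 ++ [x] else s.1, s.2.insert x c))
    (([] : List Int), (PySem.Dict.empty : PySem.Dict Int Int))).1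

-- ===== PRECONDITION & SPEC =====
def Spec_top_1_v2 (arr : List Int) (out : List Int) : Prop := out = top_1_v2_alt arr
instance (arr : List Int) (out : List Int) : Decidable (Spec_top_1_v2 arr out) := by unfold Spec_top_1_v2; infer_instance

-- ===== CLAIM (what is proved, stated in full; the proofs are below) =====
def Claim_equal_top_1_v2 : Prop := ∀ (arr : List Int), Dom_top_1_v2 arr → Spec_top_1_v2 arr (top_1_v2 arr)

-- ===== LEMMAS AND PROOFS =====

-- the common counting fold (the dict component of every loop above)
def pvCfold (p : List Int) (d : PySem.Dict Int Int) : PySem.Dict Int Int :=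
  p.foldl (fun d x => d.insert x (d.getD x 0 + 1)) d

-- A's loop step and state
def pvStepA (s : List Int × Int × PySem.Dict Int Int) (x : Int) : List Int × Int × PySem.Dict Int Int :=
  let c := s.2.2.getD x 0 + 1
  let d := s.2.2.insert x c
  if c > s.2.1 then ([x], c, d)
  else if c = s.2.1 then (s.1 ++ [x], s.2.1, d)
  else (s.1, s.2.1, d)

-- B's two loops
def pvStepM (s : PySem.Dict Int Int × Int) (x : Int) : PySem.Dict Int Int × Int :=
  let c := s.1.getD x 0 + 1
  (s.1.insert x c, max s.2 c)

def pvStepS (m : Int) (s : List Int × PySem.Dict Int Int) (x : Int) : List Int × PySem.Dict Int Int :=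
  let c := s.2.getD x 0 + 1
  (if c = m then s.1 ++ [x] else s.1, s.2.insert x c)

def pvM (p : List Int) : Int := (p.foldl pvStepM (PySem.Dict.empty, 0)).2

def pvSel (m : Int) (p : List Int) : List Int :=
  (p.foldl (pvStepS m) ([], PySem.Dict.empty)).1

theorem pvTopA_eq (arr : List Int) : top_1_v2 arr = (arr.foldl pvStepA ([], 0, PySem.Dict.empty)).1 := rfl

theorem pvTopAlt_eq (arr : List Int) : top_1_v2_alt arr = pvSel (pvM arr) arr := rfl

theorem pvFoldM_fst (p : List Int) : ∀ (d : PySem.Dict Int Int) (m : Int),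
    (p.foldl pvStepM (d, m)).1 = pvCfold p d := by
  induction p with
  | nil => intro d m; rfl
  | cons x p ih => intro d m; simpa [pvStepM, pvCfold, List.foldl_cons] using ih _ _

theorem pvFoldS_snd (m : Int) (p : List Int) : ∀ (l : List Int) (d : PySem.Dict Int Int),
    (p.foldl (pvStepS m) (l, d)).2 = pvCfold p d := by
  induction p with
  | nil => intro l d; rfl
  | cons x p ih => intro l d; simpa [pvStepS, pvCfold, List.foldl_cons] using ih _ _

theorem pvM_append (p : List Int) (x : Int) :
    pvM (p ++ [x]) = max (pvM p) ((pvCfold p PySem.Dict.empty).getD x 0 + 1) := by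
  simp [pvM, List.foldl_append, pvStepM, pvFoldM_fst]

theorem pvSel_append (m : Int) (p : List Int) (x : Int) :
    pvSel m (p ++ [x]) =
      if (pvCfold p PySem.Dict.empty).getD x 0 + 1 = m then pvSel m p ++ [x] else pvSel m p := by
  simp only [pvSel, List.foldl_append, List.foldl_cons, List.foldl_nil]
  rw [show (p.foldl (pvStepS m) ([], PySem.Dict.empty)) =
      ((p.foldl (pvStepS m) ([], PySem.Dict.empty)).1, (p.foldl (pvStepS m) ([], PySem.Dict.empty)).2) from rfl,
    pvFoldS_snd]
  simp [pvStepS]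

theorem pvCfold_append (p : List Int) (x : Int) (d : PySem.Dict Int Int) :
    pvCfold (p ++ [x]) d = (pvCfold p d).insert x ((pvCfold p d).getD x 0 + 1) := by
  simp [pvCfold, List.foldl_append]

-- every running count is at most the final running maximum, hence above pvM nothing is selected
theorem pvSel_empty (p : List Int) : ∀ (m : Int), pvM p < m → pvSel m p = [] := by
  induction p using List.reverseRecOn with
  | nil => intro m _; rfl
  | append_singleton p x ih =>
    intro m hm
    rw [pvSel_append]
    rw [pvM_append] at hm
    have h1 : (pvCfold p PySem.Dict.empty).getD x 0 + 1 < m := lt_of_le_of_lt (le_max_right _ _) hm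
    have h2 : pvM p < m := lt_of_le_of_lt (le_max_left _ _) hm
    rw [if_neg (by omega), ih m h2]

-- the main invariant: A's whole state after any prefix
theorem pvMain (p : List Int) :
    p.foldl pvStepA ([], 0, PySem.Dict.empty) = (pvSel (pvM p) p, pvM p, pvCfold p PySem.Dict.empty) := by
  induction p using List.reverseRecOn with
  | nil => rfl
  | append_singleton p x ih =>
    rw [List.foldl_append, List.foldl_cons, List.foldl_nil, ih]
    set c := (pvCfold p PySem.Dict.empty).getD x 0 + 1 with hc
    rw [pvM_append, pvCfold_append, ← hc]
    by_cases h1 : c > pvM p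
    · have hmax : max (pvM p) c = c := max_eq_right (le_of_lt h1)
      rw [hmax]
      simp only [pvStepA, ← hc, if_pos h1]
      rw [pvSel_append, if_pos rfl, pvSel_empty p c h1]
      simp
    · have hle : c ≤ pvM p := le_of_not_gt h1
      have hmax : max (pvM p) c = pvM p := max_eq_left hle
      rw [hmax]
      by_cases h2 : c = pvM p
      · simp only [pvStepA, ← hc, if_neg h1, if_pos h2]
        rw [pvSel_append, if_pos h2]
      · simp only [pvStepA, ← hc, if_neg h1, if_neg h2]
        rw [pvSel_append, if_neg h2]

-- ===== VERDICT (by name: the statement is the Claim_ definition above) =====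
theorem top_1_v2_spec : Claim_equal_top_1_v2 := by
  intro arr _
  show top_1_v2 arr = top_1_v2_alt arr
  rw [pvTopA_eq, pvTopAlt_eq, pvMain]
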